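-- pv_equiv track=rewrite | github.com/aelyn4k/http-login-lab | app.py | _safe_identifier
-- ===== SOURCE A (Python) =====
-- import string
--
-- def _safe_identifier(candidate: str, fallback: str) -> str:
--     allowed = string.ascii_letters + string.digits + "_"
--     value = candidate or fallback
--     if not value:
--         return fallback
--     if value[0].isdigit():
--         return fallback
--     if any(ch not in allowed for ch in value):
--         return fallback
--     return value
-- ===== SOURCE B (Python) =====
-- import re
--
-- _IDENT_RE = re.compile(r'[A-Za-z_][A-Za-z0-9_]*')
--
--
-- def _safe_identifier(candidate: str, fallback: str) -> str:
--     value = candidate or fallback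
--     return value if _IDENT_RE.fullmatch(value) else fallback
-- ===== Notes on version B (the rewrite author's own statement) =====
-- stated objective: idiomatic
-- what changed: Replaces the guard chain (emptiness test, leading-digit test, per-character membership scan against a 63-char allowed string) with a single compiled regular-expression fullmatch of [A-Za-z_][A-Za-z0-9_]* over value = candidate or fallback.
import Mathlib
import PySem

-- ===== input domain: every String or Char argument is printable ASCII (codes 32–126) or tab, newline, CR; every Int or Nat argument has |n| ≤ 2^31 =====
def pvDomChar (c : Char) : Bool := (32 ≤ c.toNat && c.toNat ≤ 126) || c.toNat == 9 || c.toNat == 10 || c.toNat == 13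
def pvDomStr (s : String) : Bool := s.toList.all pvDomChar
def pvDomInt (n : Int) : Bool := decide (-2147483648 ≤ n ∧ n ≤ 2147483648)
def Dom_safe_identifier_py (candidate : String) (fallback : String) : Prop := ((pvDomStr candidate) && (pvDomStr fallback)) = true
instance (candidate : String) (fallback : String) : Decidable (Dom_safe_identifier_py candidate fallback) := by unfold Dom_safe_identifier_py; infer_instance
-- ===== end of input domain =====

-- B replaces A's guard chain (emptiness, leading-digit, per-char membership scan) by a
-- single regular-expression fullmatch of [A-Za-z_][A-Za-z0-9_]*; objective: idiomatic.

-- ===== PORT A =====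
-- allowed = string.ascii_letters + string.digits + "_"
def pvAllowed : List Char := "abcdefghijklmnopqrstuvwxyzABCDEFGHIJKLMNOPQRSTUVWXYZ0123456789_".toList

def safe_identifier_py (candidate : String) (fallback : String) : String :=
  let value := if candidate.toList = [] then fallback else candidate  -- candidate or fallback
  match value.toList with
  | [] => fallback                                                    -- if not value
  | c :: _ =>
    if PySem.Chars.isdigit c then fallback                            -- if value[0].isdigit()
    else if value.toList.any (fun ch => !(pvAllowed.contains ch)) then fallback
    else value

-- ===== PORT B =====
-- the regex character classes of B: [A-Za-z_] (head) and [A-Za-z0-9_] (tail)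
def pvHeadClass (c : Char) : Bool := ('A' ≤ c && c ≤ 'Z') || ('a' ≤ c && c ≤ 'z') || c == '_'
def pvTailClass (c : Char) : Bool := ('A' ≤ c && c ≤ 'Z') || ('a' ≤ c && c ≤ 'z') || ('0' ≤ c && c ≤ '9') || c == '_'

-- fullmatch of [A-Za-z_][A-Za-z0-9_]*: one head-class char, then any number of tail-class chars
def safe_identifier_py_alt (candidate : String) (fallback : String) : String :=
  let value := if candidate.toList = [] then fallback else candidate  -- candidate or fallback
  match value.toList with
  | [] => fallback
  | c :: rest => if pvHeadClass c && rest.all pvTailClass then value else fallback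

-- ===== PRECONDITION & SPEC =====
def Spec_safe_identifier_py (candidate : String) (fallback : String) (out : String) : Prop := out = safe_identifier_py_alt candidate fallback
instance (candidate : String) (fallback : String) (out : String) : Decidable (Spec_safe_identifier_py candidate fallback out) := by unfold Spec_safe_identifier_py; infer_instance

-- ===== CLAIM (what is proved, stated in full; the proofs are below) =====
def Claim_equal_safe_identifier_py : Prop := ∀ (candidate : String) (fallback : String), Dom_safe_identifier_py candidate fallback → Spec_safe_identifier_py candidate fallback (safe_identifier_py candidate fallback)

-- ===== LEMMAS AND PROOFS =====

-- membership in A's allowed string coincides with B's tail character class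
set_option maxRecDepth 4096 in
theorem pv_contains_eq_tail (c : Char) : pvAllowed.contains c = pvTailClass c := by
  have h : pvAllowed = ['a', 'b', 'c', 'd', 'e', 'f', 'g', 'h', 'i', 'j', 'k', 'l', 'm', 'n', 'o', 'p', 'q', 'r', 's', 't', 'u', 'v', 'w', 'x', 'y', 'z', 'A', 'B', 'C', 'D', 'E', 'F', 'G', 'H', 'I', 'J', 'K', 'L', 'M', 'N', 'O', 'P', 'Q', 'R', 'S', 'T', 'U', 'V', 'W', 'X', 'Y', 'Z', '0', '1', '2', '3', '4', '5', '6', '7', '8', '9', '_'] := by decide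
  rw [h]
  simp only [pvTailClass, List.contains]
  rw [Bool.eq_iff_iff]
  simp [Char.le_def, Char.ext_iff, ← UInt32.toNat_inj, UInt32.le_iff_toNat_le]
  omega

-- B's head class = B's tail class minus the digits (A's two separate tests)
theorem pv_head_eq (c : Char) : pvHeadClass c = (pvTailClass c && !(PySem.Chars.isdigit c)) := by
  simp only [pvHeadClass, pvTailClass, PySem.Chars.isdigit]
  rw [Bool.eq_iff_iff]
  simp [Char.le_def, Char.ext_iff, ← UInt32.toNat_inj, UInt32.le_iff_toNat_le]
  omega

theorem pv_any_not (l : List Char) : (l.any fun ch => !(pvAllowed.contains ch)) = !(l.all pvTailClass) := by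
  induction l with
  | nil => rfl
  | cons c l ih =>
    rw [List.any_cons, List.all_cons, ih, pv_contains_eq_tail, Bool.not_and]

-- ===== VERDICT (by name: the statement is the Claim_ definition above) =====
theorem safe_identifier_py_spec : Claim_equal_safe_identifier_py := by
  intro candidate fallback _
  show safe_identifier_py candidate fallback = safe_identifier_py_alt candidate fallback
  unfold safe_identifier_py safe_identifier_py_alt
  generalize (if candidate.toList = [] then fallback else candidate) = v
  cases h : v.toList with
  | nil =>
    show (match v.toList with
          | [] => fallback
          | c :: _ =>
            if PySem.Chars.isdigit c then fallback
            else if v.toList.any (fun ch => !(pvAllowed.contains ch)) then fallback else v) =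
         (match v.toList with
          | [] => fallback
          | c :: rest => if pvHeadClass c && rest.all pvTailClass then v else fallback)
    rw [h]
  | cons c rest =>
    show (match v.toList with
          | [] => fallback
          | c :: _ =>
            if PySem.Chars.isdigit c then fallback
            else if v.toList.any (fun ch => !(pvAllowed.contains ch)) then fallback else v) =
         (match v.toList with
          | [] => fallback
          | c :: rest => if pvHeadClass c && rest.all pvTailClass then v else fallback)
    rw [h]
    show (if PySem.Chars.isdigit c then fallback
          else if (c :: rest).any (fun ch => !(pvAllowed.contains ch)) then fallback else v) =
         (if pvHeadClass c && rest.all pvTailClass then v else fallback)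
    rw [pv_any_not, List.all_cons, pv_head_eq]
    by_cases hd : PySem.Chars.isdigit c = true <;>
      by_cases ht : pvTailClass c = true <;>
        by_cases hr : rest.all pvTailClass = true <;>
          simp [hd, ht, hr]
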